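-- pv_equiv track=rewrite | github.com/noemimotolese/esercizio1 | esercizio2.py | venditaMin
-- ===== SOURCE A (Python) =====
-- def venditaMin(tupla_vendite):
--     vendita_min=500000
--     prodotto_min=[]
--     for (reparto, categoria), (prodotto, (metodo, importo)) in tupla_vendite:
--         if reparto=="RepartoA":
--             if importo<vendita_min:
--                 vendita_min=importo
--                 prodotto_min=[prodotto]
--             elif importo==vendita_min:
--                 prodotto_min.append(prodotto)
--     return(vendita_min, (prodotto_min))
-- ===== SOURCE B (Python) =====
-- def venditaMin(tupla_vendite):
--     rep_a = [(prodotto, importo)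
--              for (reparto, categoria), (prodotto, (metodo, importo)) in tupla_vendite
--              if reparto == "RepartoA"]
--     vendita_min = min([500000] + [importo for _, importo in rep_a])
--     prodotto_min = [prodotto for prodotto, importo in rep_a if importo == vendita_min]
--     return (vendita_min, prodotto_min)
-- ===== Notes on version B (the rewrite author's own statement) =====
-- stated objective: simpler
-- what changed: Replaces the single-pass running-min with tie tracking and list resets by a filter-then-min-then-collect decomposition: filter RepartoA rows, take min of the importos together with the 500000 seed, then collect all products at that minimum.
import Mathlib
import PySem

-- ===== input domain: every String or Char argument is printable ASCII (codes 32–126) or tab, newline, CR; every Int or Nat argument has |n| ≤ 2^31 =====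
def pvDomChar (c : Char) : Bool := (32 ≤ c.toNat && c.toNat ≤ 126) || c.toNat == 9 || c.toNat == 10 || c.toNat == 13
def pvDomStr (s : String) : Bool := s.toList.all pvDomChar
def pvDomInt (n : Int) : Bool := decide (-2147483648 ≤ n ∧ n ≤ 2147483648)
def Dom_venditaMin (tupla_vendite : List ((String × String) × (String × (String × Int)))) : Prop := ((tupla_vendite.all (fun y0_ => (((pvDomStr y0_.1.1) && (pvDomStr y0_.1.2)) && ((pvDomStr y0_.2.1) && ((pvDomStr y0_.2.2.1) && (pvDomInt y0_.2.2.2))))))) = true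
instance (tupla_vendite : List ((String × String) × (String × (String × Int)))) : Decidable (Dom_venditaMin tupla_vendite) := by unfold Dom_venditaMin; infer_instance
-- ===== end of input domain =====

-- B replaces A's single-pass running-min (with tie tracking and list resets) by a
-- filter / min / collect decomposition; same return value, objective: simpler.

-- ===== PORT A =====
-- the loop body of A: state (vendita_min, prodotto_min)
def venditaMinStep (st : Int × List String)
    (row : (String × String) × (String × (String × Int))) : Int × List String :=
  let reparto := row.1.1
  let prodotto := row.2.1
  let importo := row.2.2.2
  if reparto = "RepartoA" then
    if importo < st.1 then (importo, [prodotto])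
    else if importo = st.1 then (st.1, st.2 ++ [prodotto])
    else st
  else st

def venditaMin (tupla_vendite : List ((String × String) × (String × (String × Int)))) : Int × List String :=
  tupla_vendite.foldl venditaMinStep (500000, [])

-- ===== PORT B =====
-- rep_a = [(prodotto, importo) for … if reparto == "RepartoA"]
def venditaMinRepA (tupla_vendite : List ((String × String) × (String × (String × Int)))) : List (String × Int) :=
  (tupla_vendite.filter (fun row => row.1.1 == "RepartoA")).map (fun row => (row.2.1, row.2.2.2))

def venditaMin_alt (tupla_vendite : List ((String × String) × (String × (String × Int)))) : Int × List String :=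
  let rep_a := venditaMinRepA tupla_vendite
  -- min([500000] + importos): Python's min of a nonempty int list = left fold of min
  let vendita_min := (rep_a.map Prod.snd).foldl min 500000
  let prodotto_min := (rep_a.filter (fun pi => pi.2 == vendita_min)).map Prod.fst
  (vendita_min, prodotto_min)

-- ===== PRECONDITION & SPEC =====
def Spec_venditaMin (tupla_vendite : List ((String × String) × (String × (String × Int)))) (out : Int × List String) : Prop := out = venditaMin_alt tupla_vendite
instance (tupla_vendite : List ((String × String) × (String × (String × Int)))) (out : Int × List String) : Decidable (Spec_venditaMin tupla_vendite out) := by unfold Spec_venditaMin; infer_instance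

-- ===== CLAIM (what is proved, stated in full; the proofs are below) =====
def Claim_equal_venditaMin : Prop := ∀ (tupla_vendite : List ((String × String) × (String × (String × Int)))), Dom_venditaMin tupla_vendite → Spec_venditaMin tupla_vendite (venditaMin tupla_vendite)

-- ===== LEMMAS AND PROOFS =====

lemma foldl_min_le (l : List Int) (m : Int) : l.foldl min m ≤ m := by
  induction l generalizing m with
  | nil => simp
  | cons a t ih => exact le_trans (ih (min m a)) (min_le_left m a)

/-- A's loop step, rephrased on the projected (prodotto, importo) pair. -/
def stepP (st : Int × List String) (pi : String × Int) : Int × List String :=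
  if pi.2 < st.1 then (pi.2, [pi.1])
  else if pi.2 = st.1 then (st.1, st.2 ++ [pi.1])
  else st

lemma foldA_eq_foldP (t : List ((String × String) × (String × (String × Int))))
    (st : Int × List String) :
    t.foldl venditaMinStep st = (venditaMinRepA t).foldl stepP st := by
  induction t generalizing st with
  | nil => simp [venditaMinRepA]
  | cons x t ih =>
    by_cases hr : x.1.1 = "RepartoA"
    · simp only [venditaMinRepA, List.filter_cons, List.map_cons, List.foldl_cons,
        show (x.1.1 == "RepartoA") = true by simp [hr], if_true]
      rw [ih]
      · congr 1
        simp [venditaMinStep, stepP, hr]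
    · simp [venditaMinRepA, hr, venditaMinStep, ih]

/-- Invariant: the running-min fold on a projected list equals min-then-collect. -/
lemma foldP_invariant (l : List (String × Int)) (m0 : Int) (ps0 : List String) :
    l.foldl stepP (m0, ps0) =
      ((l.map Prod.snd).foldl min m0,
       (if (l.map Prod.snd).foldl min m0 = m0 then ps0 else []) ++
         (l.filter (fun pi => pi.2 == (l.map Prod.snd).foldl min m0)).map Prod.fst) := by
  induction l generalizing m0 ps0 with
  | nil => simp
  | cons x l ih =>
    have hM : ∀ m : Int, (l.map Prod.snd).foldl min m ≤ m := fun m => foldl_min_le _ m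
    simp only [List.foldl_cons, List.map_cons, List.filter_cons, stepP]
    rcases lt_trichotomy x.2 m0 with h | h | h
    · rw [if_pos h, ih]
      have hmin : min m0 x.2 = x.2 := min_eq_right h.le
      simp only [hmin]
      set M := (l.map Prod.snd).foldl min x.2 with hMdef
      have hMle : M ≤ x.2 := hM _
      rw [if_neg (show ¬ M = m0 by omega)]
      by_cases he : M = x.2
      · simp [he]
      · have hb : (x.2 == M) = false := by simp; omega
        simp [if_neg he, hb]
    · rw [if_neg (by omega), if_pos h, ih]
      have hmin : min m0 x.2 = m0 := by omega
      simp only [hmin]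
      set M := (l.map Prod.snd).foldl min m0 with hMdef
      have hMle : M ≤ m0 := hM _
      by_cases he : M = m0
      · simp [he, h]
      · have hb : (x.2 == M) = false := by simp; omega
        simp [he, hb]
    · rw [if_neg (by omega), if_neg (by omega), ih]
      have hmin : min m0 x.2 = m0 := min_eq_left h.le
      simp only [hmin]
      set M := (l.map Prod.snd).foldl min m0 with hMdef
      have hMle : M ≤ m0 := hM _
      have hb : (x.2 == M) = false := by simp; omega
      simp [hb]

-- ===== VERDICT (by name: the statement is the Claim_ definition above) =====
theorem venditaMin_spec : Claim_equal_venditaMin := by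
  intro t _
  show venditaMin t = venditaMin_alt t
  rw [venditaMin, venditaMin_alt, foldA_eq_foldP, foldP_invariant]
  simp
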